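-- pv_equiv track=rewrite | github.com/pypi-data/pypi-mirror-402 | packages/knowgraph/knowgraph-1.0.0.tar.gz/knowgraph-1.0.0/knowgraph/application/indexing/graph_builder.py | normalize_markdown_content
-- ===== SOURCE A (Python) =====
-- def normalize_markdown_content(content: str) -> str:
--     r"""Normalize markdown content for consistent processing.
--
--     Implements FR-005 normalization rules:
--     - Standardize line endings to \\n
--     - Remove trailing whitespace
--     - Collapse multiple blank lines to max 2
--     - Normalize header spacing
--
--     Args:
--     ----
--         content: Raw markdown content
--
--     Returns:
--     -------
--         Normalized content
--
--     """
--     # Standardize line endings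
--     content = content.replace("\r\n", "\n").replace("\r", "\n")
--
--     # Remove trailing whitespace from lines
--     lines = [line.rstrip() for line in content.split("\n")]
--
--     # Collapse multiple blank lines
--     normalized_lines = []
--     blank_count = 0
--
--     for line in lines:
--         if not line.strip():
--             blank_count += 1
--             if blank_count <= 2:
--                 normalized_lines.append(line)
--         else:
--             blank_count = 0
--             normalized_lines.append(line)
--
--     # Ensure single blank line after headers
--     result_lines = []
--     for i, line in enumerate(normalized_lines):
--         result_lines.append(line)
--         if (
--             line.startswith("#")
--             and i + 1 < len(normalized_lines)
--             and normalized_lines[i + 1].strip()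
--         ):
--             result_lines.append("")  # Add blank line
--
--     return "\n".join(result_lines)
-- ===== SOURCE B (Python) =====
-- def normalize_markdown_content(content: str) -> str:
--     """Same normalization as A, but the blank-line collapse and the
--     header-spacing pass are fused into one streaming pass that remembers
--     the previously emitted line instead of re-scanning by index."""
--     content = content.replace("\r\n", "\n").replace("\r", "\n")
--     out = []
--     blank_count = 0
--     prev = None  # last line of the collapsed stream
--     for raw in content.split("\n"):
--         line = raw.rstrip()
--         if not line.strip():
--             blank_count += 1
--             if blank_count <= 2:
--                 out.append(line)
--                 prev = line
--         else:
--             if prev is not None and prev.startswith("#"):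
--                 out.append("")
--             blank_count = 0
--             out.append(line)
--             prev = line
--     return "\n".join(out)
-- ===== Notes on version B (the rewrite author's own statement) =====
-- stated objective: simpler
-- what changed: The two separate passes (blank-line collapse, then an index-based lookahead pass that inserts a blank after headers) are fused into one streaming pass that keeps the previously emitted line, turning the lookahead into a look-behind and removing the intermediate list and the enumerate/index scan.
import Mathlib
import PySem

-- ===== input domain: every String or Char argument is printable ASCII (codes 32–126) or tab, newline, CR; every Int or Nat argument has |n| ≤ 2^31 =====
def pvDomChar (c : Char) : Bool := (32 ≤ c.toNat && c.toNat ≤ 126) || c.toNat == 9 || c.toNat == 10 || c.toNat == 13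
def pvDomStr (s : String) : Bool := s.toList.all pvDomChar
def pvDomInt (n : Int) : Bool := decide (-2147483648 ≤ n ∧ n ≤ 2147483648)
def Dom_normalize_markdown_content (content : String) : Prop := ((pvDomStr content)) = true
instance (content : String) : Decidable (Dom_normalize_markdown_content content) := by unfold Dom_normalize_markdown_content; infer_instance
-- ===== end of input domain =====

-- B fuses A's two passes (blank-line collapse, then index-based header lookahead) into one
-- streaming pass remembering the previously emitted line; same O(n) cost, simpler structure.


-- ===== PORT A =====
def normalize_markdown_content (content : String) : String :=
  -- content = content.replace("\r\n", "\n").replace("\r", "\n")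
  let content := PySem.Str.replace (PySem.Str.replace content "\r\n" "\n") "\r" "\n"
  -- lines = [line.rstrip() for line in content.split("\n")]
  let lines := ((PySem.Str.split? content "\n").getD []).map (fun line => PySem.Str.rstrip line)  -- split? is some: sep ≠ ""
  -- blank-line collapse loop (state: normalized_lines, blank_count)
  let st := lines.foldl (fun (st : List String × Int) line =>
      if PySem.Str.strip line = "" then
        let bc := st.2 + 1
        if bc ≤ 2 then (st.1 ++ [line], bc) else (st.1, bc)
      else (st.1 ++ [line], 0)) ([], 0)
  let normalized := st.1
  -- for i, line in enumerate(normalized_lines): ... normalized_lines[i+1].strip()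
  let result := (PySem.List.enumerate normalized).foldl (fun res (p : Int × String) =>
      let res := res ++ [p.2]
      if PySem.Str.startswith p.2 "#" = true ∧ p.1 + 1 < (normalized.length : Int) ∧
          ¬ PySem.Str.strip (PySem.List.pyGetD normalized (p.1 + 1) "") = "" then
        res ++ [""]
      else res) []
  PySem.Str.join "\n" result

-- ===== PORT B =====
def normalize_markdown_content_alt (content : String) : String :=
  let content := PySem.Str.replace (PySem.Str.replace content "\r\n" "\n") "\r" "\n"
  -- one streaming pass; state: (out, blank_count, prev)
  let st := ((PySem.Str.split? content "\n").getD []).foldl  -- split? is some: sep ≠ ""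
      (fun (st : List String × Int × Option String) raw =>
        let line := PySem.Str.rstrip raw
        if PySem.Str.strip line = "" then
          let bc := st.2.1 + 1
          if bc ≤ 2 then (st.1 ++ [line], bc, some line) else (st.1, bc, st.2.2)
        else
          let out := if (match st.2.2 with
                         | some p => PySem.Str.startswith p "#"
                         | none => false) = true then st.1 ++ [""] else st.1
          (out ++ [line], 0, some line)) ([], 0, none)
  PySem.Str.join "\n" st.1

-- ===== PRECONDITION & SPEC =====
def Spec_normalize_markdown_content (content : String) (out : String) : Prop := out = normalize_markdown_content_alt content
instance (content : String) (out : String) : Decidable (Spec_normalize_markdown_content content out) := by unfold Spec_normalize_markdown_content; infer_instance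

-- ===== CLAIM (what is proved, stated in full; the proofs are below) =====
def Claim_equal_normalize_markdown_content : Prop := ∀ (content : String), Dom_normalize_markdown_content content → Spec_normalize_markdown_content content (normalize_markdown_content content)

-- ===== LEMMAS AND PROOFS =====

-- A's first loop as a recursion
def pvCollapse (b : Int) : List String → List String
  | [] => []
  | l :: ls =>
    if PySem.Str.strip l = "" then
      (if b + 1 ≤ 2 then l :: pvCollapse (b + 1) ls else pvCollapse (b + 1) ls)
    else l :: pvCollapse 0 ls

def pvNextNb : List String → Bool
  | [] => false
  | t :: _ => !(PySem.Str.strip t == "")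

-- A's second loop as a recursion with one-element lookahead
def pvHdr : List String → List String
  | [] => []
  | l :: ls => l :: ((if PySem.Str.startswith l "#" && pvNextNb ls then [""] else []) ++ pvHdr ls)

-- look-behind form of the header pass: flag = "previous emitted line starts with '#'"
def pvH (p : Bool) : List String → List String
  | [] => []
  | l :: ls =>
    (if p && !(PySem.Str.strip l == "") then [""] else []) ++
      l :: pvH (PySem.Str.startswith l "#") ls

def pvIsHash : Option String → Bool
  | none => false
  | some p => PySem.Str.startswith p "#"

-- B's loop as a recursion
def pvFused (b : Int) (prev : Option String) : List String → List String
  | [] => []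
  | raw :: rs =>
    let line := PySem.Str.rstrip raw
    if PySem.Str.strip line = "" then
      (if b + 1 ≤ 2 then line :: pvFused (b + 1) (some line) rs else pvFused (b + 1) prev rs)
    else (if pvIsHash prev then [""] else []) ++ line :: pvFused 0 (some line) rs

lemma pvCollapse_fold (ls : List String) : ∀ (acc : List String) (b : Int),
    (ls.foldl (fun (st : List String × Int) line =>
      if PySem.Str.strip line = "" then
        let bc := st.2 + 1
        if bc ≤ 2 then (st.1 ++ [line], bc) else (st.1, bc)
      else (st.1 ++ [line], 0)) (acc, b)).1 = acc ++ pvCollapse b ls := by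
  induction ls with
  | nil => intro acc b; simp [pvCollapse]
  | cons l ls ih =>
    intro acc b
    by_cases h : PySem.Str.strip l = ""
    · by_cases h2 : b + 1 ≤ 2
      · simp only [List.foldl_cons, if_pos h, if_pos h2]
        rw [ih]
        simp [pvCollapse, h, h2]
      · simp only [List.foldl_cons, if_pos h, if_neg h2]
        rw [ih]
        simp [pvCollapse, h, h2]
    · simp only [List.foldl_cons, if_neg h]
      rw [ih]
      simp [pvCollapse, h]

lemma pvFused_fold (rs : List String) : ∀ (acc : List String) (b : Int) (prev : Option String),
    (rs.foldl (fun (st : List String × Int × Option String) raw =>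
        let line := PySem.Str.rstrip raw
        if PySem.Str.strip line = "" then
          let bc := st.2.1 + 1
          if bc ≤ 2 then (st.1 ++ [line], bc, some line) else (st.1, bc, st.2.2)
        else
          let out := if (match st.2.2 with
                         | some p => PySem.Str.startswith p "#"
                         | none => false) = true then st.1 ++ [""] else st.1
          (out ++ [line], 0, some line)) (acc, b, prev)).1 = acc ++ pvFused b prev rs := by
  induction rs with
  | nil => intro acc b prev; simp [pvFused]
  | cons raw rs ih =>
    intro acc b prev
    by_cases h : PySem.Str.strip (PySem.Str.rstrip raw) = ""
    · by_cases h2 : b + 1 ≤ 2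
      · simp only [List.foldl_cons, if_pos h, if_pos h2]
        rw [ih]
        simp [pvFused, h, h2]
      · simp only [List.foldl_cons, if_pos h, if_neg h2]
        rw [ih]
        simp [pvFused, h, h2]
    · cases prev with
      | none =>
        simp only [List.foldl_cons, if_neg h]
        rw [ih]
        simp [pvFused, h, pvIsHash]
      | some p =>
        by_cases hp : PySem.Str.startswith p "#" = true
        · have hp' : PySem.Chars.startswith p.toList ['#'] = true := by simpa using hp
          simp only [List.foldl_cons, if_neg h]
          rw [ih]
          simp [pvFused, h, hp', pvIsHash]
        · have hp' : PySem.Chars.startswith p.toList ['#'] = false := by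
            simpa using Bool.eq_false_iff.mpr hp
          simp only [List.foldl_cons, if_neg h]
          rw [ih]
          simp [pvFused, h, hp', pvIsHash]

lemma pvHdr_fold (full : List String) : ∀ (tail : List String) (i : Nat) (acc : List String),
    full.drop i = tail →
    (PySem.List.enumerate tail (i : Int)).foldl (fun res (p : Int × String) =>
      let res := res ++ [p.2]
      if PySem.Str.startswith p.2 "#" = true ∧ p.1 + 1 < (full.length : Int) ∧
          ¬ PySem.Str.strip (PySem.List.pyGetD full (p.1 + 1) "") = "" then
        res ++ [""]
      else res) acc = acc ++ pvHdr tail := by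
  intro tail
  induction tail with
  | nil => intro i acc _; simp [PySem.List.enumerate_nil, pvHdr]
  | cons l ls ih =>
    intro i acc hdrop
    have hi : i < full.length := by
      rcases Nat.lt_or_ge i full.length with h' | h'
      · exact h'
      · rw [List.drop_eq_nil_of_le h'] at hdrop; cases hdrop
    have hlen : full.length = i + 1 + ls.length := by
      have h2 := congrArg List.length hdrop
      simp [List.length_drop] at h2
      omega
    have hdrop1 : full.drop (i + 1) = ls := by
      have h3 : full.drop (i + 1) = (full.drop i).drop 1 := by
        rw [List.drop_drop, Nat.add_comm]
      rw [h3, hdrop]; rfl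
    have hcast : (i : Int) + 1 = ((i + 1 : Nat) : Int) := by push_cast; ring
    simp only [PySem.List.enumerate_cons, List.foldl_cons]
    cases ls with
    | nil =>
      have hnc : ¬ (PySem.Str.startswith l "#" = true ∧ (i : Int) + 1 < (full.length : Int) ∧
          ¬ PySem.Str.strip (PySem.List.pyGetD full ((i : Int) + 1) "") = "") := by
        rintro ⟨-, h2, -⟩
        rw [hlen] at h2
        push_cast [List.length_nil] at h2
        omega
      rw [if_neg hnc]
      simp [PySem.List.enumerate_nil, pvHdr, pvNextNb]
    | cons t ts =>
      have hlt : ((i : Int) + 1 < (full.length : Int)) := by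
        rw [hlen]; push_cast [List.length_cons]; omega
      have hget' : PySem.List.pyGetD full ((i : Int) + 1) "" = t := by
        rw [hcast, PySem.List.pyGetD_natCast]
        have h4 : full[i + 1]? = some t := by
          rw [← List.head?_drop, hdrop1]
          rfl
        simp [List.getD, h4]
      by_cases hC : (PySem.Str.startswith l "#" = true ∧ (i : Int) + 1 < (full.length : Int) ∧
          ¬ PySem.Str.strip (PySem.List.pyGetD full ((i : Int) + 1) "") = "")
      · rw [if_pos hC]
        rw [hcast, ih (i + 1) _ hdrop1]
        have hC3 : ¬ PySem.Str.strip t = "" := by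
          have h6 := hC.2.2
          rw [hget'] at h6
          exact h6
        have h7 : PySem.Chars.startswith l.toList ['#'] = true := by simpa using hC.1
        have hnb : pvNextNb (t :: ts) = true := by simp [pvNextNb, hC3]
        simp [pvHdr, h7, hnb]
      · rw [if_neg hC]
        rw [hcast, ih (i + 1) _ hdrop1]
        simp only [pvHdr]
        simp
        intro hsw
        have hsw' : PySem.Str.startswith l "#" = true := by simpa using hsw
        have h2 : PySem.Str.strip t = "" := by
          by_contra h2
          exact hC ⟨hsw', hlt, by rw [hget']; exact h2⟩
        simp [pvNextNb, h2]

lemma pvH_eq_pvHdr : ∀ (ls : List String) (p : Bool),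
    pvH p ls = (if p && pvNextNb ls then [""] else []) ++ pvHdr ls := by
  intro ls
  induction ls with
  | nil => intro p; simp [pvH, pvHdr, pvNextNb]
  | cons l ls ih =>
    intro p
    simp only [pvH, pvHdr, pvNextNb, ih (PySem.Str.startswith l "#")]
    simp

lemma pvFused_eq (rs : List String) : ∀ (b : Int) (prev : Option String),
    pvFused b prev rs = pvH (pvIsHash prev) (pvCollapse b (rs.map PySem.Str.rstrip)) := by
  induction rs with
  | nil => intro b prev; simp [pvFused, pvCollapse, pvH]
  | cons raw rs ih =>
    intro b prev
    simp only [List.map_cons, pvFused, pvCollapse]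
    by_cases h : PySem.Str.strip (PySem.Str.rstrip raw) = ""
    · by_cases h2 : b + 1 ≤ 2
      · simp [h, h2, ih, pvH, pvIsHash]
      · simp [h, h2, ih]
    · simp [h, ih, pvH, pvIsHash, Bool.eq_false_iff.mpr]

-- ===== VERDICT (by name: the statement is the Claim_ definition above) =====
theorem normalize_markdown_content_spec : Claim_equal_normalize_markdown_content := by
  intro content _
  simp only [Spec_normalize_markdown_content, normalize_markdown_content,
    normalize_markdown_content_alt]
  generalize ((PySem.Str.split? (PySem.Str.replace (PySem.Str.replace content "\r\n" "\n") "\r" "\n") "\n").getD []) = raws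
  rw [pvFused_fold, pvCollapse_fold]
  simp only [List.nil_append]
  have h := pvHdr_fold (pvCollapse 0 (raws.map (fun line => PySem.Str.rstrip line)))
      (pvCollapse 0 (raws.map (fun line => PySem.Str.rstrip line))) 0 [] (by simp)
  simp only [Nat.cast_zero, List.nil_append] at h
  rw [pvFused_eq, pvH_eq_pvHdr]
  simp only [pvIsHash, Bool.false_and, Bool.false_eq_true, if_false, List.nil_append]
  exact congrArg (PySem.Str.join "\n") h
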